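-- pv_equiv track=rewrite | github.com/34ndju/qmc_stuff | cvx_qmc.py | get_pstring
-- ===== SOURCE A (Python) =====
-- n = 4 # number of qubits
--
-- def get_pstring(subset, paulis):
--     assert len(subset) == len(paulis)
--     out = []
--     for i in range(n):
--         try:
--             out.append(paulis[subset.index(i)])
--         except ValueError:
--             out.append('I')
--     return out
-- ===== SOURCE B (Python) =====
-- n = 4 # number of qubits
--
-- def get_pstring(subset, paulis):
--     assert len(subset) == len(paulis)
--     out = ['I'] * n
--     seen = set()
--     for idx, p in zip(subset, paulis):
--         if 0 <= idx < n and idx not in seen: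
--             out[idx] = p
--             seen.add(idx)
--     return out
-- ===== Notes on version B (the rewrite author's own statement) =====
-- stated objective: alternative
-- what changed: B pre-fills ['I']*n and does one scatter pass over zip(subset, paulis) with a seen-set for first-occurrence-wins, instead of A's gather that runs subset.index(i) for every position i in range(n).
import Mathlib
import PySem

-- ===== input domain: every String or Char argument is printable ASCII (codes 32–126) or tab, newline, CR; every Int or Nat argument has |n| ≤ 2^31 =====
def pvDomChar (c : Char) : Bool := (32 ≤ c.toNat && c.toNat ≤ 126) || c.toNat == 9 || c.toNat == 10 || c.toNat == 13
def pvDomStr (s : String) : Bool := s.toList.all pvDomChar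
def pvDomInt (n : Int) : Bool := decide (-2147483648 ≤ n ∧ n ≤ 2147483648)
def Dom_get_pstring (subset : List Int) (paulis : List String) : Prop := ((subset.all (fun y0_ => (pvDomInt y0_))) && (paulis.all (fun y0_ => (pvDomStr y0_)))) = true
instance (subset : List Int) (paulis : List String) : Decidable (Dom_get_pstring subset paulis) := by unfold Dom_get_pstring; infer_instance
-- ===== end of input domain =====

-- B replaces A's per-position gather (subset.index(i) for each i in range(n)) by one
-- scatter pass over zip(subset, paulis) into a pre-filled ['I']*n (first occurrence wins).

-- ===== PORT A =====
-- for i in range(4): try out.append(paulis[subset.index(i)]) except ValueError: out.append('I')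
-- Under Pre_ (equal lengths, the assert) the found index is always in range, so the
-- .getD "I" default of the uncaught-IndexError branch is unreachable.
def get_pstring (subset : List Int) (paulis : List String) : List String :=
  (PySem.List.pyRange 0 4 1).foldl (fun out i =>
    match PySem.List.index? subset i with
    | some j => out ++ [(PySem.List.pyGet? paulis (j : Int)).getD "I"]
    | none   => out ++ ["I"]) []

-- ===== PORT B =====
-- the loop: for idx, p in zip(subset, paulis): if 0 <= idx < 4 and idx not in seen: out[idx] = p; seen.add(idx)
-- out[idx] = p is List.set idx.toNat p: the guard 0 ≤ idx < 4 = out.length makes it exact.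
def pvScatter : List (Int × String) → List String → PySem.Set Int → List String
  | [], out, _ => out
  | (idx, p) :: rest, out, seen =>
    if 0 ≤ idx ∧ idx < 4 ∧ ¬ PySem.Set.contains seen idx then
      pvScatter rest (out.set idx.toNat p) (PySem.Set.add seen idx)
    else
      pvScatter rest out seen

def get_pstring_alt (subset : List Int) (paulis : List String) : List String :=
  pvScatter (subset.zip paulis) (List.replicate 4 "I") PySem.Set.empty

-- ===== PRECONDITION & SPEC =====
-- Pre_: the 'assert len(subset) == len(paulis)' at the top of A (and B): A raises AssertionError otherwise.
def Pre_get_pstring (subset : List Int) (paulis : List String) : Prop :=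
  subset.length = paulis.length
instance (subset : List Int) (paulis : List String) : Decidable (Pre_get_pstring subset paulis) := by unfold Pre_get_pstring; infer_instance
def pvWitness_get_pstring : List Int × List String := ([0, 2], ["X", "Z"])
def Spec_get_pstring (subset : List Int) (paulis : List String) (out : List String) : Prop := out = get_pstring_alt subset paulis
instance (subset : List Int) (paulis : List String) (out : List String) : Decidable (Spec_get_pstring subset paulis out) := by unfold Spec_get_pstring; infer_instance

-- ===== CLAIM (what is proved, stated in full; the proofs are below) =====
def Claim_equal_get_pstring : Prop := ∀ (subset : List Int) (paulis : List String), Dom_get_pstring subset paulis → Pre_get_pstring subset paulis → Spec_get_pstring subset paulis (get_pstring subset paulis)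

-- ===== LEMMAS AND PROOFS =====

-- A's body for one position, named so A's fold can be written as a 4-element literal
def pvGather (subset : List Int) (paulis : List String) (v : Int) : String :=
  match PySem.List.index? subset v with
  | some j => (PySem.List.pyGet? paulis (j : Int)).getD "I"
  | none   => "I"

theorem pvScatter_length (pairs : List (Int × String)) (out : List String) (seen : PySem.Set Int) :
    (pvScatter pairs out seen).length = out.length := by
  induction pairs generalizing out seen with
  | nil => rfl
  | cons q rest ih =>
    obtain ⟨idx, p⟩ := q
    unfold pvScatter
    split_ifs with h
    · rw [ih]; simp
    · exact ih _ _

-- the untouched-index invariant: an already-seen index is never overwritten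
theorem pvScatter_get_seen (pairs : List (Int × String)) (out : List String)
    (seen : PySem.Set Int) (k : ℕ) (hseen : (k : Int) ∈ seen) :
    (pvScatter pairs out seen)[k]? = out[k]? := by
  induction pairs generalizing out seen with
  | nil => rfl
  | cons q rest ih =>
    obtain ⟨idx, p⟩ := q
    unfold pvScatter
    split_ifs with h
    · obtain ⟨h0, h4, hns⟩ := h
      have hne : idx ≠ (k : Int) := by
        intro he; subst he; exact hns ((PySem.Set.contains_iff _ _).mpr hseen)
      rw [ih _ _ ((PySem.Set.mem_add _ _ _).mpr (Or.inl hseen))]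
      rw [List.getElem?_set_ne (by omega)]
    · exact ih _ _ hseen

-- the write invariant: an unseen index k gets the p of the FIRST pair (k, p), else keeps out[k]
theorem pvScatter_get_unseen (pairs : List (Int × String)) (out : List String)
    (seen : PySem.Set Int) (k : ℕ) (hk : k < 4) (hlen : out.length = 4)
    (hseen : (k : Int) ∉ seen) :
    (pvScatter pairs out seen)[k]? =
      match pairs.find? (fun q => q.1 == (k : Int)) with
      | some q => some q.2
      | none => out[k]? := by
  induction pairs generalizing out seen with
  | nil => rfl
  | cons q rest ih =>
    obtain ⟨idx, p⟩ := q
    unfold pvScatter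
    by_cases he : idx = (k : Int)
    · subst he
      rw [if_pos ⟨by positivity, by exact_mod_cast hk,
            fun hc => hseen ((PySem.Set.contains_iff _ _).mp hc)⟩]
      rw [pvScatter_get_seen _ _ _ _ ((PySem.Set.mem_add _ _ _).mpr (Or.inr rfl))]
      rw [List.find?_cons_of_pos (by simp)]
      simp [hlen, hk]
    · rw [List.find?_cons_of_neg (by simpa using he)]
      split_ifs with h
      · obtain ⟨h0, h4, hns⟩ := h
        have hne : idx.toNat ≠ k := by omega
        rw [ih _ _ (by simp [hlen])
              (fun hm => by rcases (PySem.Set.mem_add _ _ _).mp hm with hm | hm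
                            exacts [hseen hm, he hm.symm])]
        rw [List.getElem?_set_ne hne]
      · exact ih _ _ hlen hseen

-- A's per-position gather equals B's first-match over the zipped pairs
theorem zip_find_eq (v : Int) :
    ∀ (subset : List Int) (paulis : List String), subset.length = paulis.length →
    ((subset.zip paulis).find? (fun q => q.1 == v)).map Prod.snd =
      (PySem.List.index? subset v).bind (fun j => paulis[j]?) := by
  intro subset
  induction subset with
  | nil => intro paulis _; simp [PySem.List.index?_eq_idxOf?, List.idxOf?]
  | cons x xs ih =>
    intro paulis hlen
    match paulis with
    | [] => simp at hlen
    | p :: ps =>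
      by_cases he : x = v
      · subst he
        rw [List.zip_cons_cons, List.find?_cons_of_pos (by simp),
            PySem.List.index?_cons_self]
        rfl
      · have h1 := PySem.List.index?_cons_of_ne xs he
        have h2 := ih ps (by simpa using hlen)
        rw [List.zip_cons_cons, List.find?_cons_of_neg (by simpa using he), h1, h2]
        cases PySem.List.index? xs v with
        | none => rfl
        | some j => simp

-- B's k-th entry is A's body at position k (under the length assert)
theorem alt_get (subset : List Int) (paulis : List String)
    (hpre : subset.length = paulis.length) (k : ℕ) (hk : k < 4) :
    (get_pstring_alt subset paulis)[k]? = some (pvGather subset paulis (k : Int)) := by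
  unfold get_pstring_alt
  rw [pvScatter_get_unseen _ _ _ k hk (by simp) (by simp [PySem.Set.empty])]
  have hfind := zip_find_eq (k : Int) subset paulis hpre
  unfold pvGather
  cases hf : (subset.zip paulis).find? (fun q => q.1 == (k : Int)) with
  | none =>
    rw [hf] at hfind
    cases hi : PySem.List.index? subset (k : Int) with
    | none => simp [hk]; interval_cases k <;> rfl
    | some j =>
      exfalso
      rw [hi] at hfind
      have hnone : paulis[j]? = none := by simpa using hfind.symm
      obtain ⟨hj, -, -⟩ := PySem.List.getElem_of_index?_eq_some hi
      rw [List.getElem?_eq_getElem (by omega : j < paulis.length)] at hnone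
      exact Option.some_ne_none _ hnone
  | some q =>
    rw [hf] at hfind
    cases hi : PySem.List.index? subset (k : Int) with
    | none => rw [hi] at hfind; exact absurd hfind (by simp)
    | some j =>
      rw [hi] at hfind
      have hsome : paulis[j]? = some q.2 := by simpa using hfind.symm
      simp [PySem.List.pyGet?_natCast, hsome]

-- ===== VERDICT (by name: the statement is the Claim_ definition above) =====
theorem get_pstring_spec : Claim_equal_get_pstring := by
  intro subset paulis _ hpre
  unfold Spec_get_pstring
  have hA : get_pstring subset paulis =
      [pvGather subset paulis 0, pvGather subset paulis 1,
       pvGather subset paulis 2, pvGather subset paulis 3] := by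
    rw [get_pstring, show PySem.List.pyRange 0 4 1 = [0, 1, 2, 3] from by decide]
    simp only [List.foldl_cons, List.foldl_nil, pvGather]
    cases h0 : List.idxOf? (0 : Int) subset <;> cases h1 : List.idxOf? (1 : Int) subset <;>
      cases h2 : List.idxOf? (2 : Int) subset <;> cases h3 : List.idxOf? (3 : Int) subset <;>
        simp [h0, h1, h2, h3]
  have hlenB : (get_pstring_alt subset paulis).length = 4 := by
    unfold get_pstring_alt; rw [pvScatter_length]; rfl
  apply List.ext_getElem?
  intro k
  by_cases hk : k < 4
  · rw [hA, alt_get subset paulis hpre k hk]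
    interval_cases k <;> simp
  · have h4 : 4 ≤ k := by omega
    rw [hA, List.getElem?_eq_none (by simpa using h4),
        List.getElem?_eq_none (by rw [hlenB]; exact h4)]
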